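-- pv_equiv track=rewrite | github.com/daniel-reich/ubiquitous-fiesta | HBuWYyh5YCmDKF4uH_2.py | almost_sorted
-- ===== SOURCE A (Python) =====
-- def almost_sorted(list):
--     rev_list = sorted(list)
--     rev_list.reverse()
--     if list == sorted(list) or list == rev_list:
--         return False
--     for i in range(len(list)):
--         test_list = list[:]
--         test_list.pop(i)
--         sorted_list2 = sorted(test_list[:])
--         sorted_list2.reverse()
--         sorted_list = sorted(test_list)
--         if test_list == sorted_list or test_list == sorted_list2:
--             return True
--     return False
-- ===== SOURCE B (Python) =====
-- def almost_sorted(list):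
--     # O(n): find the first ascending and descending violations; deleting one
--     # element can only help if it is one of the two members of that pair.
--     n = len(list)
--
--     def mono(l, cmp):
--         return all(cmp(a, b) for a, b in zip(l, l[1:]))
--
--     def first_bad(cmp):
--         for j in range(n - 1):
--             if not cmp(list[j], list[j + 1]):
--                 return j
--         return None
--
--     def without(i):
--         return list[:i] + list[i + 1:]
--
--     asc = lambda a, b: a <= b
--     desc = lambda a, b: b <= a
--     i = first_bad(asc)
--     d = first_bad(desc)
--     if i is None or d is None:
--         return False
--     return (mono(without(i), asc) or mono(without(i + 1), asc)
--             or mono(without(d), desc) or mono(without(d + 1), desc))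
-- ===== Notes on version B (the rewrite author's own statement) =====
-- stated objective: faster
-- what changed: Replaced the quadratic try-every-deletion loop (each trial re-sorting the list twice) by a linear scan that finds the first ascending and descending adjacent violations and tests only the two candidate deletions for each direction, checking monotonicity by an adjacent-pair pass with no sorting at all.
import Mathlib
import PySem

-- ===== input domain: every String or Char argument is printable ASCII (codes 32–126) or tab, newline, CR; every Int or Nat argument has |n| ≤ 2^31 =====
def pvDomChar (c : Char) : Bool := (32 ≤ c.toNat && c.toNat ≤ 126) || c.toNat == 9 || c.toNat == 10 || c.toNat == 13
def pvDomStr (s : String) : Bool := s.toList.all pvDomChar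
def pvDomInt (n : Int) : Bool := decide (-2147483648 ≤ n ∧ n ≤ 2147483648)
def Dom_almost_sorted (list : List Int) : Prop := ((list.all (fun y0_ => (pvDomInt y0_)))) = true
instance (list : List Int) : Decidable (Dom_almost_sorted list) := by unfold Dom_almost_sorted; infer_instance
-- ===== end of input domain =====

-- B replaces A's try-every-deletion loop (re-sorting on each trial) with a linear
-- scan testing only the two candidate deletions at the first violation of each direction.

-- ===== PORT A =====
-- the for-loop with its early 'return True'
def almostSortedLoopA (list : List Int) : List Int → Bool
  | [] => false
  | i :: rest =>
    match PySem.List.pop? list i with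
    | none => false   -- unreachable for i in range(len(list)); totality guard only
    | some (_, test_list) =>
      let sorted_list2 := (PySem.List.sorted test_list (fun x => x) false).reverse
      let sorted_list := PySem.List.sorted test_list (fun x => x) false
      if test_list = sorted_list ∨ test_list = sorted_list2 then true
      else almostSortedLoopA list rest

def almost_sorted (list : List Int) : Bool :=
  let rev_list := (PySem.List.sorted list (fun x => x) false).reverse
  if list = PySem.List.sorted list (fun x => x) false ∨ list = rev_list then false
  else almostSortedLoopA list (PySem.List.pyRange 0 list.length 1)

-- ===== PORT B =====
-- mono(l, cmp): all adjacent pairs (zip of l with its tail) satisfy cmp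
def monoB (cmp : Int → Int → Bool) (l : List Int) : Bool :=
  (l.zip l.tail).all (fun p => cmp p.1 p.2)

-- first_bad(cmp): index of the first adjacent pair violating cmp, None if monotone
def firstBadB (cmp : Int → Int → Bool) : List Int → Option Nat
  | [] => none
  | [_] => none
  | a :: b :: t => if cmp a b then (firstBadB cmp (b :: t)).map (· + 1) else some 0

-- without(i) = list[:i] + list[i+1:]
def withoutB (l : List Int) (i : Nat) : List Int := l.take i ++ l.drop (i + 1)

def almost_sorted_alt (list : List Int) : Bool :=
  let asc := fun a b : Int => decide (a ≤ b)
  let desc := fun a b : Int => decide (b ≤ a)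
  match firstBadB asc list, firstBadB desc list with
  | some i, some d =>
      monoB asc (withoutB list i) || monoB asc (withoutB list (i + 1)) ||
      monoB desc (withoutB list d) || monoB desc (withoutB list (d + 1))
  | _, _ => false

-- ===== PRECONDITION & SPEC =====
def Spec_almost_sorted (list : List Int) (out : Bool) : Prop := out = almost_sorted_alt list
instance (list : List Int) (out : Bool) : Decidable (Spec_almost_sorted list out) := by unfold Spec_almost_sorted; infer_instance

-- ===== CLAIM (what is proved, stated in full; the proofs are below) =====
def Claim_equal_almost_sorted : Prop := ∀ (list : List Int), Dom_almost_sorted list → Spec_almost_sorted list (almost_sorted list)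


-- ===== LEMMAS AND PROOFS =====

-- monoB unfolds on two cons
lemma monoB_cons2 (cmp : Int → Int → Bool) (a b : Int) (t : List Int) :
    monoB cmp (a :: b :: t) = (cmp a b && monoB cmp (b :: t)) := by
  simp [monoB]

lemma monoB_iff_chain (cmp : Int → Int → Bool) (l : List Int) :
    monoB cmp l = true ↔ l.IsChain (fun a b => cmp a b = true) := by
  induction l with
  | nil => simp [monoB]
  | cons a t ih =>
    cases t with
    | nil => simp [monoB]
    | cons b t' =>
      rw [monoB_cons2, Bool.and_eq_true, ih]
      simp [List.isChain_cons_cons]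

-- mono by indices
lemma monoB_iff_idx (cmp : Int → Int → Bool) (l : List Int) :
    monoB cmp l = true ↔ ∀ k (h : k + 1 < l.length), cmp (l[k]'(by omega)) (l[k+1]'h) = true := by
  rw [monoB_iff_chain, List.isChain_iff_getElem]

-- without is eraseIdx
lemma withoutB_eq (l : List Int) (i : Nat) : withoutB l i = l.eraseIdx i := by
  rw [withoutB, List.eraseIdx_eq_take_drop_succ]

-- firstBadB = none ↔ monotone
lemma firstBadB_none (cmp : Int → Int → Bool) (l : List Int) :
    firstBadB cmp l = none ↔ monoB cmp l = true := by
  induction l with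
  | nil => simp [firstBadB, monoB]
  | cons a t ih =>
    cases t with
    | nil => simp [firstBadB, monoB]
    | cons b t' =>
      rw [firstBadB, monoB_cons2, Bool.and_eq_true, ← ih]
      by_cases h : cmp a b = true <;> simp [h]

-- firstBadB = some i → the pair at i violates cmp
lemma firstBadB_some (cmp : Int → Int → Bool) (l : List Int) (i : Nat)
    (h : firstBadB cmp l = some i) :
    ∃ h1 : i + 1 < l.length, cmp (l[i]'(by omega)) (l[i+1]'h1) = false := by
  induction l generalizing i with
  | nil => simp [firstBadB] at h
  | cons a t ih =>
    cases t with
    | nil => simp [firstBadB] at h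
    | cons b t' =>
      rw [firstBadB] at h
      by_cases hc : cmp a b = true
      · rw [if_pos hc, Option.map_eq_some_iff] at h
        obtain ⟨i', hi', hadd⟩ := h
        subst hadd
        obtain ⟨h1, h2⟩ := ih i' hi'
        refine ⟨by simpa using h1, ?_⟩
        simpa using h2
      · rw [if_neg hc] at h
        cases h
        refine ⟨by simp, ?_⟩
        simpa using Bool.eq_false_iff.mpr hc

-- deleting any index other than i or i+1 keeps the violating pair adjacent
lemma erase_keeps_violation (cmp : Int → Int → Bool) (l : List Int) (i j : Nat)
    (h1 : i + 1 < l.length) (hv : cmp (l[i]'(by omega)) (l[i+1]'h1) = false)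
    (hji : j ≠ i) (hji1 : j ≠ i + 1) :
    monoB cmp (l.eraseIdx j) = false := by
  rw [← Bool.not_eq_true, monoB_iff_idx]
  intro hmono
  by_cases hj : j < l.length
  · have hlen : (l.eraseIdx j).length = l.length - 1 := by
      rw [List.length_eraseIdx]; simp [hj]
    rcases Nat.lt_or_ge j i with hlt | hge
    · -- j < i: the pair sits at indices i-1, i of the erased list
      have hk : (i - 1) + 1 < (l.eraseIdx j).length := by omega
      have := hmono (i - 1) hk
      rw [List.getElem_eraseIdx, List.getElem_eraseIdx] at this
      rw [dif_neg (by omega), dif_neg (by omega)] at this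
      have e1 : i - 1 + 1 = i := by omega
      simp only [e1] at this
      rw [hv] at this; exact Bool.false_ne_true this
    · -- j > i+1: the pair stays at indices i, i+1
      have hgt : i + 1 < j := by omega
      have hk : i + 1 < (l.eraseIdx j).length := by omega
      have := hmono i hk
      rw [List.getElem_eraseIdx, List.getElem_eraseIdx] at this
      rw [dif_pos (by omega), dif_pos (by omega)] at this
      rw [hv] at this; exact Bool.false_ne_true this
  · -- j out of range: eraseIdx is the identity
    have : l.eraseIdx j = l := List.eraseIdx_of_length_le (by omega)
    rw [this] at hmono
    have := hmono i h1
    rw [hv] at this; exact Bool.false_ne_true this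

-- A's candidate set collapses to {i, i+1}
lemma exists_erase_iff (cmp : Int → Int → Bool) (l : List Int) (i : Nat)
    (h : firstBadB cmp l = some i) :
    (∃ j, j < l.length ∧ monoB cmp (l.eraseIdx j) = true) ↔
      (monoB cmp (l.eraseIdx i) = true ∨ monoB cmp (l.eraseIdx (i+1)) = true) := by
  obtain ⟨h1, hv⟩ := firstBadB_some cmp l i h
  constructor
  · rintro ⟨j, hjlen, hj⟩
    by_cases hji : j = i
    · subst hji; exact Or.inl hj
    by_cases hji1 : j = i + 1
    · subst hji1; exact Or.inr hj
    · exact absurd hj (by rw [erase_keeps_violation cmp l i j h1 hv hji hji1]; simp)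
  · rintro (hj | hj)
    · exact ⟨i, by omega, hj⟩
    · exact ⟨i + 1, by omega, hj⟩

-- ascending mono as Pairwise
lemma monoB_asc_iff (l : List Int) :
    monoB (fun a b => decide (a ≤ b)) l = true ↔ l.Pairwise (· ≤ ·) := by
  rw [monoB_iff_chain, ← List.isChain_iff_pairwise]
  simp

-- descending mono as Pairwise
lemma monoB_desc_iff (l : List Int) :
    monoB (fun a b => decide (b ≤ a)) l = true ↔ l.Pairwise (fun a b => b ≤ a) := by
  rw [monoB_iff_chain, ← List.isChain_iff_pairwise]
  simp

-- list == sorted(list) iff ascending-monotone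
lemma eq_sorted_iff (l : List Int) :
    l = PySem.List.sorted l (fun x => x) false ↔ monoB (fun a b => decide (a ≤ b)) l = true := by
  rw [monoB_asc_iff]
  constructor
  · intro h
    have := PySem.List.sorted_pairwise l (fun x => x)
    rw [← h] at this; simpa using this
  · intro h
    exact (PySem.List.sorted_eq_self_of_pairwise l (fun x => x) (by simpa using h)).symm

-- list == reversed(sorted(list)) iff descending-monotone
lemma eq_rev_sorted_iff (l : List Int) :
    l = (PySem.List.sorted l (fun x => x) false).reverse ↔ monoB (fun a b => decide (b ≤ a)) l = true := by
  rw [monoB_desc_iff]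
  constructor
  · intro h
    have hp := PySem.List.sorted_pairwise l (fun x => x)
    have : (PySem.List.sorted l (fun x => x) false).reverse.Pairwise (fun a b => b ≤ a) := by
      rw [List.pairwise_reverse]; simpa using hp
    rw [← h] at this; exact this
  · intro h
    have hp : l.reverse.Pairwise (fun a b : Int => a ≤ b) := by
      rw [List.pairwise_reverse]; exact h
    have := PySem.List.sorted_id_eq_of_perm_of_pairwise l l.reverse (l.reverse_perm) hp
    rw [this]; simp

-- A's loop is an existential over the index list
lemma loopA_iff (l : List Int) (idxs : List Int)
    (hb : ∀ i ∈ idxs, 0 ≤ i ∧ i < l.length) :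
    almostSortedLoopA l idxs = true ↔
      ∃ j : Nat, (j : Int) ∈ idxs ∧
        (monoB (fun a b => decide (a ≤ b)) (l.eraseIdx j) = true ∨
         monoB (fun a b => decide (b ≤ a)) (l.eraseIdx j) = true) := by
  induction idxs with
  | nil => simp [almostSortedLoopA]
  | cons i rest ih =>
    obtain ⟨hi0, hilen⟩ := hb i (by simp)
    have hj : i = ((i.toNat : Nat) : Int) := by omega
    have hjlen : i.toNat < l.length := by omega
    rw [almostSortedLoopA]
    rw [hj, PySem.List.pop?_natCast l i.toNat hjlen]
    have hrec := ih (fun x hx => hb x (by simp [hx]))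
    by_cases hc : (l.eraseIdx i.toNat = PySem.List.sorted (l.eraseIdx i.toNat) (fun x => x) false ∨
        l.eraseIdx i.toNat = (PySem.List.sorted (l.eraseIdx i.toNat) (fun x => x) false).reverse)
    · simp only [if_pos hc, true_iff]
      refine ⟨i.toNat, by simp [← hj], ?_⟩
      rcases hc with hc | hc
      · exact Or.inl ((eq_sorted_iff _).mp hc)
      · exact Or.inr ((eq_rev_sorted_iff _).mp hc)
    · simp only [if_neg hc]
      rw [hrec]
      constructor
      · rintro ⟨j, hmem, hj'⟩
        exact ⟨j, by simp [hmem], hj'⟩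
      · rintro ⟨j, hmem, hj'⟩
        rcases List.mem_cons.mp hmem with heq | hmem'
        · exfalso
          have hji : (j : Nat) = i.toNat := by omega
          subst hji
          rcases hj' with hm | hm
          · exact hc (Or.inl ((eq_sorted_iff _).mpr hm))
          · exact hc (Or.inr ((eq_rev_sorted_iff _).mpr hm))
        · exact ⟨j, hmem', hj'⟩

-- ===== VERDICT (by name: the statement is the Claim_ definition above) =====
theorem almost_sorted_spec : Claim_equal_almost_sorted := by
  intro l _
  show almost_sorted l = almost_sorted_alt l
  rw [Bool.eq_iff_iff]
  rw [almost_sorted, almost_sorted_alt]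
  by_cases hm : (l = PySem.List.sorted l (fun x => x) false ∨
      l = (PySem.List.sorted l (fun x => x) false).reverse)
  · -- already monotone: both sides false
    simp only [if_pos hm]
    rcases hm with hc | hc
    · have : firstBadB (fun a b : Int => decide (a ≤ b)) l = none :=
        (firstBadB_none _ _).mpr ((eq_sorted_iff _).mp hc)
      rw [this]
    · have : firstBadB (fun a b : Int => decide (b ≤ a)) l = none :=
        (firstBadB_none _ _).mpr ((eq_rev_sorted_iff _).mp hc)
      rw [this]
      cases firstBadB (fun a b : Int => decide (a ≤ b)) l <;> simp
  · simp only [if_neg hm]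
    push Not at hm
    obtain ⟨ha, hd⟩ := hm
    have hasc : monoB (fun a b : Int => decide (a ≤ b)) l ≠ true :=
      fun h => ha ((eq_sorted_iff _).mpr h)
    have hdesc : monoB (fun a b : Int => decide (b ≤ a)) l ≠ true :=
      fun h => hd ((eq_rev_sorted_iff _).mpr h)
    obtain ⟨i, hi⟩ : ∃ i, firstBadB (fun a b : Int => decide (a ≤ b)) l = some i := by
      cases h : firstBadB (fun a b : Int => decide (a ≤ b)) l with
      | none => exact absurd ((firstBadB_none _ _).mp h) hasc
      | some i => exact ⟨i, rfl⟩
    obtain ⟨d, hdd⟩ : ∃ d, firstBadB (fun a b : Int => decide (b ≤ a)) l = some d := by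
      cases h : firstBadB (fun a b : Int => decide (b ≤ a)) l with
      | none => exact absurd ((firstBadB_none _ _).mp h) hdesc
      | some d => exact ⟨d, rfl⟩
    rw [hi, hdd]
    rw [loopA_iff l _ (fun x hx => by
      have := PySem.List.mem_pyRange_one.mp hx; exact ⟨this.1, by omega⟩)]
    have hmem : ∀ j : Nat, ((j : Int) ∈ PySem.List.pyRange 0 l.length ↔ j < l.length) := by
      intro j; rw [PySem.List.mem_pyRange_one]; omega
    constructor
    · rintro ⟨j, hjm, hj | hj⟩
      · have := (exists_erase_iff _ l i hi).mp ⟨j, (hmem j).mp hjm, hj⟩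
        simp only [withoutB_eq, Bool.or_eq_true]
        rcases this with h | h
        · exact Or.inl (Or.inl (Or.inl h))
        · exact Or.inl (Or.inl (Or.inr h))
      · have := (exists_erase_iff _ l d hdd).mp ⟨j, (hmem j).mp hjm, hj⟩
        simp only [withoutB_eq, Bool.or_eq_true]
        rcases this with h | h
        · exact Or.inl (Or.inr h)
        · exact Or.inr h
    · intro h
      simp only [withoutB_eq, Bool.or_eq_true] at h
      rcases h with ((h | h) | h) | h
      · obtain ⟨j, hjl, hj⟩ := (exists_erase_iff _ l i hi).mpr (Or.inl h)
        exact ⟨j, (hmem j).mpr hjl, Or.inl hj⟩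
      · obtain ⟨j, hjl, hj⟩ := (exists_erase_iff _ l i hi).mpr (Or.inr h)
        exact ⟨j, (hmem j).mpr hjl, Or.inl hj⟩
      · obtain ⟨j, hjl, hj⟩ := (exists_erase_iff _ l d hdd).mpr (Or.inl h)
        exact ⟨j, (hmem j).mpr hjl, Or.inr hj⟩
      · obtain ⟨j, hjl, hj⟩ := (exists_erase_iff _ l d hdd).mpr (Or.inr h)
        exact ⟨j, (hmem j).mpr hjl, Or.inr hj⟩
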